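-- pv_equiv track=rewrite | github.com/thirumal-kumar/interview_analyzer | analysis.py | keyword_coverage
-- ===== SOURCE A (Python) =====
-- def keyword_coverage(user_keywords, transcript_text):
--     lower = transcript_text.lower()
--     found = []
--     missing = []
--     for k in user_keywords:
--         if k.strip().lower() in lower:
--             found.append(k)
--         else:
--             missing.append(k)
--     return {"found": found, "missing": missing}
-- ===== SOURCE B (Python) =====
-- def keyword_coverage(user_keywords, transcript_text):
--     lower = transcript_text.lower()
--     norms = [k.strip().lower() for k in user_keywords]
--     # index the transcript once: every window of each needed length, as a hash set
--     subs = set()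
--     for L in set(len(p) for p in norms):
--         for i in range(len(lower) - L + 1):
--             subs.add(lower[i:i+L])
--     found, missing = [], []
--     for k in user_keywords:
--         (found if k.strip().lower() in subs else missing).append(k)
--     return {"found": found, "missing": missing}
-- ===== Notes on version B (the rewrite author's own statement) =====
-- stated objective: faster
-- what changed: Replaces A's per-keyword substring search over the whole transcript with an index built once — the hash set of all transcript windows of each needed keyword length — so each keyword is classified by a single set lookup.
import Mathlib
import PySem

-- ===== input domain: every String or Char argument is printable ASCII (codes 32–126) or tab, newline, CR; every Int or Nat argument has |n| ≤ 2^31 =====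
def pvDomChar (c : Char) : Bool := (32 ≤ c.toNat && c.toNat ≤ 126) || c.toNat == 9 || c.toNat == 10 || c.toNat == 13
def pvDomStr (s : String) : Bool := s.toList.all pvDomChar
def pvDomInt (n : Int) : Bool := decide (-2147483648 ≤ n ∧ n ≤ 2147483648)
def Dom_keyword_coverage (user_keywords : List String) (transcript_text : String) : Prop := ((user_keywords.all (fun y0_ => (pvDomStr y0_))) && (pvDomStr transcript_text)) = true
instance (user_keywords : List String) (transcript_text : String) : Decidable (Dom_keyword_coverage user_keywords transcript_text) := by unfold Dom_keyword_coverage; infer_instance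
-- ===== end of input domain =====

-- B replaces A's per-keyword substring searches by an index built once from the transcript: the set of all
-- transcript windows of each needed length; each keyword is then decided by a single set lookup.

-- ===== PORT A =====
def keyword_coverage (user_keywords : List String) (transcript_text : String) : List (String × List String) :=
  let lower := PySem.Str.lower transcript_text
  let fm := user_keywords.foldl
    (fun (st : List String × List String) k =>
      if PySem.Str.isIn (PySem.Str.lower (PySem.Str.strip k)) lower then (st.1 ++ [k], st.2)
      else (st.1, st.2 ++ [k]))
    ([], [])
  [("found", fm.1), ("missing", fm.2)]

-- ===== PORT B =====
def keyword_coverage_alt (user_keywords : List String) (transcript_text : String) : List (String × List String) :=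
  let lower := PySem.Str.lower transcript_text
  let norms := user_keywords.map (fun k => PySem.Str.lower (PySem.Str.strip k))
  -- set(len(p) for p in norms); iterated below only to build another set, so order cannot matter
  let lengths : PySem.Set Int := PySem.Set.ofList (norms.map (fun p => PySem.Str.len p))
  -- for L in lengths: for i in range(len(lower) - L + 1): subs.add(lower[i:i+L])
  let subs : PySem.Set String := lengths.foldl
    (fun (s : PySem.Set String) L =>
      (PySem.List.pyRange 0 (PySem.Str.len lower - L + 1)).foldl
        (fun (s : PySem.Set String) i => PySem.Set.add s (PySem.Str.slice lower (some i) (some (i + L))))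
        s)
    PySem.Set.empty
  let fm := user_keywords.foldl
    (fun (st : List String × List String) k =>
      if PySem.Set.contains subs (PySem.Str.lower (PySem.Str.strip k)) then (st.1 ++ [k], st.2)
      else (st.1, st.2 ++ [k]))
    ([], [])
  [("found", fm.1), ("missing", fm.2)]

-- ===== PRECONDITION & SPEC =====
def Spec_keyword_coverage (user_keywords : List String) (transcript_text : String) (out : List (String × List String)) : Prop := out = keyword_coverage_alt user_keywords transcript_text
instance (user_keywords : List String) (transcript_text : String) (out : List (String × List String)) : Decidable (Spec_keyword_coverage user_keywords transcript_text out) := by unfold Spec_keyword_coverage; infer_instance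

-- ===== CLAIM (what is proved, stated in full; the proofs are below) =====
def Claim_equal_keyword_coverage : Prop := ∀ (user_keywords : List String) (transcript_text : String), Dom_keyword_coverage user_keywords transcript_text → Spec_keyword_coverage user_keywords transcript_text (keyword_coverage user_keywords transcript_text)

-- ===== LEMMAS AND PROOFS =====

-- A loop filling two accumulator lists is the pair of filters.
theorem foldl_partition (hit : String → Bool) (uk f m : List String) :
    uk.foldl (fun (st : List String × List String) k =>
        if hit k then (st.1 ++ [k], st.2) else (st.1, st.2 ++ [k])) (f, m)
      = (f ++ uk.filter (fun k => hit k), m ++ uk.filter (fun k => !hit k)) := by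
  induction uk generalizing f m with
  | nil => simp
  | cons k t ih =>
    by_cases h : hit k = true <;> simp [List.foldl_cons, h, ih]

-- membership in the window index built by B's two nested loops
theorem subs_mem (w : Int → Int → String) (hi : Int → Int) (Ls : List Int)
    (s0 : PySem.Set String) (x : String) :
    x ∈ Ls.foldl
        (fun (s : PySem.Set String) L =>
          (PySem.List.pyRange 0 (hi L)).foldl
            (fun (s : PySem.Set String) i => PySem.Set.add s (w L i)) s)
        s0
      ↔ x ∈ s0 ∨ ∃ L ∈ Ls, ∃ i ∈ PySem.List.pyRange 0 (hi L), x = w L i := by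
  induction Ls generalizing s0 with
  | nil => simp
  | cons L t ih =>
    simp only [List.foldl_cons, ih, PySem.Set.mem_foldl_add]
    constructor
    · rintro ((h | ⟨i, hi', rfl⟩) | ⟨L', hL', h⟩)
      · exact Or.inl h
      · exact Or.inr ⟨L, List.mem_cons_self, i, hi', rfl⟩
      · exact Or.inr ⟨L', List.mem_cons_of_mem _ hL', h⟩
    · rintro (h | ⟨L', hL', i, hi', rfl⟩)
      · exact Or.inl (Or.inl h)
      · rcases List.mem_cons.1 hL' with rfl | hL'
        · exact Or.inl (Or.inr ⟨i, hi', rfl⟩)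
        · exact Or.inr ⟨L', hL', i, hi', rfl⟩

-- a window of x's own length exists iff x occurs in the transcript
theorem window_iff_isIn (lower : String) (lengths : List Int) (x : String)
    (hnn : ∀ L ∈ lengths, 0 ≤ L) (hxlen : PySem.Str.len x ∈ lengths) :
    (∃ L ∈ lengths, ∃ i ∈ PySem.List.pyRange 0 (PySem.Str.len lower - L + 1),
        x = PySem.Str.slice lower (some i) (some (i + L)))
      ↔ PySem.Chars.isIn x.toList lower.toList = true := by
  rw [← PySem.Chars.exists_prefix_drop_iff_isIn]
  constructor
  · rintro ⟨L, hL, i, hiR, rfl⟩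
    have h0i : 0 ≤ i := by
      have := (PySem.List.mem_pyRange_one.1 hiR).1; omega
    refine ⟨i.toNat, ?_⟩
    have hcast : (PySem.Str.slice lower (some i) (some (i + L))).toList
        = (lower.toList.drop i.toNat).take (L.toNat) := by
      have hi' : i = ((i.toNat : Nat) : Int) := by omega
      have hL' : L = ((L.toNat : Nat) : Int) := by
        have := hnn L hL; omega
      rw [hi', hL', PySem.Str.toList_slice, PySem.Chars.slice_eq_listSlice,
        PySem.List.slice_natCast_add]
      simp
      congr 1
      · omega
      · congr 1
        omega
    rw [hcast]
    exact List.take_prefix _ _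
  · rintro ⟨j, hpre⟩
    set cs := lower.toList with hcs
    by_cases hj : j ≤ cs.length
    · have hlen : x.toList.length ≤ cs.length - j := by
        have := hpre.length_le
        simp only [List.length_drop] at this
        omega
      refine ⟨PySem.Str.len x, hxlen, (j : Int), ?_, ?_⟩
      · rw [PySem.List.mem_pyRange_one, PySem.Str.len_eq, PySem.Str.len_eq, ← hcs]
        constructor
        · omega
        · omega
      · have hx : x.toList = (cs.drop j).take x.toList.length :=
          List.prefix_iff_eq_take.1 hpre
        have : (PySem.Str.slice lower (some (j : Int)) (some ((j : Int) + PySem.Str.len x))).toList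
            = (cs.drop j).take x.toList.length := by
          rw [PySem.Str.len_eq, PySem.Str.toList_slice, PySem.Chars.slice_eq_listSlice]
          exact_mod_cast PySem.List.slice_natCast_add cs j x.toList.length
        apply String.toList_inj.1
        rw [this, ← hx]
    · -- j past the end: the prefix forces x = "", matched by the window at position 0
      have hdrop : cs.drop j = [] := List.drop_eq_nil_of_le (by omega)
      rw [hdrop] at hpre
      have hx : x.toList = [] := List.prefix_nil.1 hpre
      have hx0 : PySem.Str.len x = 0 := by rw [PySem.Str.len_eq, hx]; rfl
      refine ⟨PySem.Str.len x, hxlen, 0, ?_, ?_⟩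
      · rw [PySem.List.mem_pyRange_one, hx0, PySem.Str.len_eq]
        constructor
        · omega
        · have : (0 : Int) ≤ cs.length := by positivity
          omega
      · apply String.toList_inj.1
        rw [hx, hx0, PySem.Str.toList_slice, PySem.Chars.slice_eq_listSlice]
        have : PySem.List.slice cs (some ((0 : Nat) : Int)) (some (((0 : Nat) : Int) + ((0 : Nat) : Int))) = (cs.drop 0).take 0 :=
          PySem.List.slice_natCast_add cs 0 0
        simpa using this.symm

-- ===== VERDICT (by name: the statement is the Claim_ definition above) =====
theorem keyword_coverage_spec : Claim_equal_keyword_coverage := by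
  intro uk t _
  unfold Spec_keyword_coverage keyword_coverage keyword_coverage_alt
  simp only []
  rw [foldl_partition, foldl_partition]
  set lower := PySem.Str.lower t with hlower
  set norms := uk.map (fun k => PySem.Str.lower (PySem.Str.strip k)) with hnorms
  set lengths : PySem.Set Int := PySem.Set.ofList (norms.map (fun p => PySem.Str.len p)) with hlengths
  have hnn : ∀ L ∈ lengths, 0 ≤ L := by
    intro L hL
    rw [hlengths, PySem.Set.mem_ofList] at hL
    obtain ⟨p, _, rfl⟩ := List.mem_map.1 hL
    rw [PySem.Str.len_eq]
    positivity
  have hhit : ∀ k ∈ uk,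
      PySem.Str.isIn (PySem.Str.lower (PySem.Str.strip k)) lower
        = PySem.Set.contains
            (lengths.foldl
              (fun (s : PySem.Set String) L =>
                (PySem.List.pyRange 0 (PySem.Str.len lower - L + 1)).foldl
                  (fun (s : PySem.Set String) i =>
                    PySem.Set.add s (PySem.Str.slice lower (some i) (some (i + L)))) s)
              PySem.Set.empty)
            (PySem.Str.lower (PySem.Str.strip k)) := by
    intro k hk
    set x := PySem.Str.lower (PySem.Str.strip k) with hx
    have hxlen : PySem.Str.len x ∈ lengths := by
      rw [hlengths, PySem.Set.mem_ofList]
      exact List.mem_map.2 ⟨x, by rw [hnorms]; exact List.mem_map.2 ⟨k, hk, rfl⟩, rfl⟩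
    rw [Bool.eq_iff_iff, PySem.Set.contains_iff,
      subs_mem (fun L i => PySem.Str.slice lower (some i) (some (i + L)))
        (fun L => PySem.Str.len lower - L + 1) lengths PySem.Set.empty x,
      PySem.Str.isIn_eq]
    constructor
    · intro h
      exact Or.inr ((window_iff_isIn lower lengths x hnn hxlen).2 h)
    · rintro (h | h)
      · simp [PySem.Set.empty] at h
      · exact (window_iff_isIn lower lengths x hnn hxlen).1 h
  have e1 := List.filter_congr (l := uk) (fun k hk => hhit k hk)
  have e2 := List.filter_congr (l := uk)
    (fun k hk => by rw [hhit k hk] :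
      ∀ k ∈ uk, (!PySem.Str.isIn (PySem.Str.lower (PySem.Str.strip k)) lower)
        = _)
  rw [e1, e2]
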